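-- pv_equiv track=rewrite | github.com/dmitry957/codewars-training | kata/5-kyu/maximize-your-earnings-with-mandatory-breaks/solution.py | maximize_earnings
-- ===== SOURCE A (Python) =====
-- def maximize_earnings(earnings, k):
--     n = len(earnings)
--     if n == 0:
--         return 0
--     neg_inf = float('-inf')
--     dp_break = 0
--     dp_work = [neg_inf] * (k + 1)
--     for v in earnings:
--         new_work = [neg_inf] * (k + 1)
--         new_break = max([dp_break] + dp_work[1:])
--         new_work[1] = dp_break + v
--         for j in range(2, k + 1):
--             if dp_work[j - 1] != neg_inf:
--                 new_work[j] = dp_work[j - 1] + v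
--         dp_break, dp_work = new_break, new_work
--
--     return int(max(dp_break, max(dp_work[1:])))
-- ===== SOURCE B (Python) =====
-- def maximize_earnings(earnings, k):
--     # Break-position DP over prefix sums: c[j] = (best total with day j a break) - sum(earnings[:j]);
--     # each new break takes the max over the last k+1 entries of c.
--     if not earnings:
--         return 0
--     s = 0        # running prefix sum
--     c = [0]      # c[j], newest last
--     for v in earnings:
--         b = s + max(c[max(len(c) - k - 1, 0):])
--         s += v
--         c.append(b - s)
--     return s + max(c[max(len(c) - k - 1, 0):])
-- ===== Notes on version B (the rewrite author's own statement) =====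
-- stated objective: alternative
-- what changed: A tracks a per-day DP state array over counts of consecutive worked days (rebuilding a (k+1)-slot Python list of floats each day with an inner index loop); B instead runs a break-position DP over a running prefix sum, where each new break value is one max() over a slice of the last k+1 break values.
import Mathlib
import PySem

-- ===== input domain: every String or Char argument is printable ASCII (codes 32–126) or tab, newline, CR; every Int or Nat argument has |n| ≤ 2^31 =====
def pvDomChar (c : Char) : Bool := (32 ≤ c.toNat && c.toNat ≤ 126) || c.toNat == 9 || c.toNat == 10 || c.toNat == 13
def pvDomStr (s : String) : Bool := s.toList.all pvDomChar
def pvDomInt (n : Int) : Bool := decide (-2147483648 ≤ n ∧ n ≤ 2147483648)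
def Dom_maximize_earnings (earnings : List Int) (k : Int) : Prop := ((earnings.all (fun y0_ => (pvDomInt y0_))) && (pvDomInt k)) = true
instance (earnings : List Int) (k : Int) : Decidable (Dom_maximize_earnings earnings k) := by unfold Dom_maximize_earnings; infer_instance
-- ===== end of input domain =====

-- B replaces A's per-day consecutive-work-state array DP by a break-position DP over a
-- running prefix sum with a max over the last k+1 break values (objective: alternative).


-- ===== PORT A =====
-- dp_work is a list of Option Int: none stands for Python's float('-inf') sentinel.
-- max([dp_break] + dp_work[1:]) : fold max over the tail, skipping the -inf entries.
def pvSkipFold (a : Int) (l : List (Option Int)) : Int :=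
  l.foldl (fun m o => match o with | none => m | some x => max m x) a

-- max(dp_work[1:]) alone: Option-valued running max (none = all entries -inf / raises on []).
def pvOptFold (o : Option Int) (l : List (Option Int)) : Option Int :=
  l.foldl (fun m e => match m, e with
    | none, e => e
    | some a, none => some a
    | some a, some b => some (max a b)) o

-- dp_work[j - 1] on the Python list, as O(1) array indexing; exact Python semantics:
-- a negative index wraps, out of range is none (IndexError) - same as PySem.List.pyGet?.
def pvAGet? (a : Array (Option Int)) (i : Int) : Option (Option Int) :=
  match PySem.List.pyIdx? a.size i with
  | some k => a[k]?
  | none => none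

def maximize_earnings (earnings : List Int) (k : Int) : Int :=
  if earnings.length = 0 then 0
  else
    let fin := earnings.foldl (fun (st : Int × Array (Option Int)) v =>
      let dpb := st.1
      let dpw := st.2
      let newBreak := pvSkipFold dpb (PySem.List.slice dpw.toList (some 1) none)
      let nw1 := (Array.replicate (k + 1).toNat (none : Option Int)).set! 1 (some (dpb + v))
      let nw := (PySem.List.pyRange 2 (k + 1) 1).foldl (fun w j =>
          match pvAGet? dpw (j - 1) with
          | some (some x) => w.set! j.toNat (some (x + v))
          | _ => w) nw1    -- '| _ => w': dp_work[j-1] == -inf skips; out-of-range impossible for 1 <= k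
      (newBreak, nw)) (0, Array.replicate (k + 1).toNat (none : Option Int))
    match pvOptFold none (PySem.List.slice fin.2.toList (some 1) none) with
    | none => fin.1            -- max(dp_work[1:]) = -inf => int(max(dp_break, -inf)) = dp_break
    | some m => max fin.1 m

-- ===== PORT B =====
-- Python max(l) on a nonempty int list; [] raises ValueError in Python (excluded by Pre_).
def pvMax (l : List Int) : Int :=
  match l with
  | [] => 0
  | h :: t => t.foldl max h

def maximize_earnings_alt (earnings : List Int) (k : Int) : Int :=
  if earnings = [] then 0
  else
    let fin := earnings.foldl (fun (st : Int × List Int) v =>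
      let s := st.1
      let c := st.2
      let b := s + pvMax (PySem.List.slice c (some (max ((c.length : Int) - k - 1) 0)) none)
      let s' := s + v
      (s', c ++ [b - s'])) (0, [0])
    fin.1 + pvMax (PySem.List.slice fin.2 (some (max ((fin.2.length : Int) - k - 1) 0)) none)

-- ===== PRECONDITION & SPEC =====
-- Pre_ excludes k ≤ 0 with nonempty earnings: there A indexes new_work[1] into a list of
-- length ≤ 1 and raises IndexError (it returns on every other input).
def Pre_maximize_earnings (earnings : List Int) (k : Int) : Prop :=
  earnings = [] ∨ 1 ≤ k

instance (earnings : List Int) (k : Int) : Decidable (Pre_maximize_earnings earnings k) := by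
  unfold Pre_maximize_earnings; infer_instance

def pvWitness_maximize_earnings : List Int × Int := ([3, -1, 4], 2)

def Spec_maximize_earnings (earnings : List Int) (k : Int) (out : Int) : Prop :=
  out = maximize_earnings_alt earnings k

instance (earnings : List Int) (k : Int) (out : Int) : Decidable (Spec_maximize_earnings earnings k out) := by
  unfold Spec_maximize_earnings; infer_instance

-- ===== CLAIM (what is proved, stated in full; the proofs are below) =====
def Claim_equal_maximize_earnings : Prop := ∀ (earnings : List Int) (k : Int), Dom_maximize_earnings earnings k → Pre_maximize_earnings earnings k → Spec_maximize_earnings earnings k (maximize_earnings earnings k)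

-- ===== LEMMAS AND PROOFS =====

lemma pvSkipFold_cons_none (a : Int) (t : List (Option Int)) :
    pvSkipFold a (none :: t) = pvSkipFold a t := rfl
lemma pvSkipFold_cons_some (a x : Int) (t : List (Option Int)) :
    pvSkipFold a (some x :: t) = pvSkipFold (max a x) t := rfl
lemma pvOptFold_cons_none_left (e : Option Int) (t : List (Option Int)) :
    pvOptFold none (e :: t) = pvOptFold e t := rfl
lemma pvOptFold_cons_none (a : Int) (t : List (Option Int)) :
    pvOptFold (some a) (none :: t) = pvOptFold (some a) t := rfl
lemma pvOptFold_cons_some (a b : Int) (t : List (Option Int)) :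
    pvOptFold (some a) (some b :: t) = pvOptFold (some (max a b)) t := rfl

lemma pvSkipFold_ge_init (l : List (Option Int)) (a : Int) : a ≤ pvSkipFold a l := by
  induction l generalizing a with
  | nil => simp [pvSkipFold]
  | cons h t ih =>
    cases h with
    | none => simpa [pvSkipFold_cons_none] using ih a
    | some x =>
      rw [pvSkipFold_cons_some]
      exact le_trans (le_max_left a x) (ih (max a x))

lemma pvSkipFold_ge_mem (l : List (Option Int)) (a x : Int) (h : some x ∈ l) :
    x ≤ pvSkipFold a l := by
  induction l generalizing a with
  | nil => simp at h
  | cons e t ih =>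
    rcases List.mem_cons.mp h with he | ht
    · subst he
      rw [pvSkipFold_cons_some]
      exact le_trans (le_max_right a x) (pvSkipFold_ge_init t (max a x))
    · cases e with
      | none => rw [pvSkipFold_cons_none]; exact ih ht (a := a)
      | some y => rw [pvSkipFold_cons_some]; exact ih ht (a := max a y)

lemma pvSkipFold_cases (l : List (Option Int)) (a : Int) :
    pvSkipFold a l = a ∨ some (pvSkipFold a l) ∈ l := by
  induction l generalizing a with
  | nil => left; rfl
  | cons e t ih =>
    cases e with
    | none =>
      rw [pvSkipFold_cons_none]
      rcases ih a with h | h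
      · exact Or.inl h
      · exact Or.inr (List.mem_cons_of_mem _ h)
    | some y =>
      rw [pvSkipFold_cons_some]
      rcases ih (max a y) with h | h
      · rcases max_cases a y with ⟨hm, _⟩ | ⟨hm, _⟩
        · left; rw [hm] at h ⊢; exact h
        · right; rw [hm] at h ⊢; rw [h]; exact List.mem_cons_self
      · exact Or.inr (List.mem_cons_of_mem _ h)

lemma pvOptFold_skip_gen : ∀ (l : List (Option Int)) (o : Option Int) (a : Int),
    (match pvOptFold o l with | none => a | some m => max a m) =
      pvSkipFold (match o with | none => a | some m => max a m) l := by
  intro l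
  induction l with
  | nil => intro o a; cases o <;> rfl
  | cons e t ih =>
    intro o a
    cases o with
    | none =>
      cases e with
      | none => rw [pvOptFold_cons_none_left, pvSkipFold_cons_none]; exact ih none a
      | some x =>
        rw [pvOptFold_cons_none_left, pvSkipFold_cons_some]
        exact ih (some x) a
    | some b =>
      cases e with
      | none => rw [pvOptFold_cons_none, pvSkipFold_cons_none]; exact ih (some b) a
      | some x =>
        rw [pvOptFold_cons_some, pvSkipFold_cons_some]
        have := ih (some (max b x)) a
        simpa [max_assoc] using this

lemma pvOptFold_skip (l : List (Option Int)) (a : Int) :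
    (match pvOptFold none l with | none => a | some m => max a m) = pvSkipFold a l :=
  pvOptFold_skip_gen l none a

lemma pvMax_ge_mem (l : List Int) (y : Int) (hy : y ∈ l) : y ≤ pvMax l := by
  match l with
  | [] => simp at hy
  | h :: t =>
    rcases List.mem_cons.mp hy with rfl | ht
    · exact (PySem.List.le_foldl_max t y).1
    · exact (PySem.List.le_foldl_max t h).2 y ht

lemma pvMax_mem (l : List Int) (hl : l ≠ []) : pvMax l ∈ l := by
  match l with
  | h :: t =>
    rcases PySem.List.foldl_max_mem t h with h1 | h1
    · rw [pvMax, h1]; exact List.mem_cons_self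
    · exact List.mem_cons_of_mem _ h1


-- The invariant tying A's state (dp_break, dp_work) after processing a prefix to B's
-- state (s, c): s is the prefix sum, c the break-value list, dp_break = s + c's last
-- entry, and dp_work[j] = c_(i-j) + s for 1 <= j <= min i K, -inf (none) otherwise.
def pvInv (K : Nat) (s : Int) (cs : List Int) (dpb : Int) (dpw : List (Option Int)) : Prop :=
  cs ≠ [] ∧
  dpb = s + cs.getD (cs.length - 1) 0 ∧
  dpw = (List.range (K + 1)).map (fun j =>
    if 1 ≤ j ∧ j ≤ min (cs.length - 1) K then some (cs.getD (cs.length - 1 - j) 0 + s) else none)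

lemma pvWindow (K : Nat) (s : Int) (cs : List Int) (dpb : Int) (dpw : List (Option Int))
    (h : pvInv K s cs dpb dpw) :
    pvSkipFold dpb (PySem.List.slice dpw (some 1) none) =
      s + pvMax (PySem.List.slice cs (some (max ((cs.length : Int) - (K : Int) - 1) 0)) none) := by
  obtain ⟨hne, hdpb, hdpw⟩ := h
  set i := cs.length - 1 with hi
  have hclen : cs.length = i + 1 := by
    cases cs with
    | nil => exact absurd rfl hne
    | cons a t => simp [hi]
  set m := min i K with hm
  -- the two slices
  have hsl1 : PySem.List.slice dpw (some 1) none = dpw.tail := PySem.List.slice_from_one dpw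
  have hslc : PySem.List.slice cs (some (max ((cs.length : Int) - (K : Int) - 1) 0)) none = cs.drop (i - m) := by
    rw [PySem.List.slice_from _ (le_max_right _ 0)]
    congr 1
    rw [hclen]
    push_cast
    omega
  have htail : dpw.tail = (List.range' 1 K).map (fun j =>
      if 1 ≤ j ∧ j ≤ m then some (cs.getD (i - j) 0 + s) else none) := by
    rw [hdpw, List.range_eq_range', List.range'_succ, List.map_cons]
    rfl
  -- membership characterisation of the tail entries
  have hmem : ∀ x : Int, some x ∈ dpw.tail ↔
      ∃ j : Nat, 1 ≤ j ∧ j ≤ m ∧ x = cs.getD (i - j) 0 + s := by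
    intro x
    rw [htail]
    constructor
    · intro hx
      rcases List.mem_map.mp hx with ⟨j, hj, hfx⟩
      rcases List.mem_range'_1.mp hj with ⟨hj1, hj2⟩
      by_cases hc : 1 ≤ j ∧ j ≤ m
      · rw [if_pos hc] at hfx
        exact ⟨j, hc.1, hc.2, by injection hfx with h'; omega⟩
      · rw [if_neg hc] at hfx; cases hfx
    · rintro ⟨j, hj1, hj2, rfl⟩
      apply List.mem_map.mpr
      refine ⟨j, List.mem_range'_1.mpr ⟨hj1, by omega⟩, ?_⟩
      rw [if_pos ⟨hj1, hj2⟩]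
  -- window facts
  set w := cs.drop (i - m) with hw
  have hwlen : w.length = m + 1 := by
    rw [hw, List.length_drop]; omega
  have hwne : w ≠ [] := by
    intro hc; rw [hc] at hwlen; simp at hwlen
  have hwget : ∀ t : Nat, (ht : t < w.length) → w[t] = cs.getD (i - (m - t)) 0 := by
    intro t ht
    have h2 : w[t] = cs[i - m + t]'(by simp [hw] at ht ⊢; omega) := by
      simp [hw, List.getElem_drop]
    rw [h2, List.getD_eq_getElem cs 0 (show i - (m - t) < cs.length by omega)]
    congr 1
    omega
  rw [hsl1, hslc]
  apply le_antisymm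
  · rcases pvSkipFold_cases dpw.tail dpb with hc | hc
    · rw [hc, hdpb]
      have : cs.getD i 0 ∈ w := by
        have ht : m < w.length := by omega
        have := hwget m ht
        rw [show i - (m - m) = i by omega] at this
        rw [← this]
        exact List.getElem_mem ht
      have := pvMax_ge_mem w _ this
      omega
    · rcases (hmem _).mp hc with ⟨j, hj1, hj2, hx⟩
      rw [hx]
      have ht : m - j < w.length := by omega
      have hg := hwget (m - j) ht
      rw [show m - (m - j) = j by omega] at hg
      have : cs.getD (i - j) 0 ∈ w := by rw [← hg]; exact List.getElem_mem ht
      have := pvMax_ge_mem w _ this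
      omega
  · have hmw := pvMax_mem w hwne
    rcases List.mem_iff_getElem.mp hmw with ⟨t, ht, hgt⟩
    rw [← hgt, hwget t ht]
    set j := m - t with hj
    by_cases hj0 : j = 0
    · rw [hj0]
      simp only [Nat.sub_zero]
      rw [← hdpb]
      exact pvSkipFold_ge_init _ _
    · have : some (cs.getD (i - j) 0 + s) ∈ dpw.tail :=
        (hmem _).mpr ⟨j, by omega, by omega, rfl⟩
      have := pvSkipFold_ge_mem _ dpb _ this
      omega

def pvCondSet (dpw : List (Option Int)) (v : Int) (w : List (Option Int)) (j : Int) : List (Option Int) :=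
  match PySem.List.pyGet? dpw (j - 1) with
  | some (some x) => w.set j.toNat (some (x + v))
  | _ => w

lemma pvCondSet_length (dpw : List (Option Int)) (v : Int) (w : List (Option Int)) (j : Int) :
    (pvCondSet dpw v w j).length = w.length := by
  unfold pvCondSet
  cases PySem.List.pyGet? dpw (j - 1) with
  | none => rfl
  | some o => cases o with
    | none => rfl
    | some x => simp

lemma pvFoldSet_length (dpw : List (Option Int)) (v : Int) :
    ∀ (l : List Int) (w : List (Option Int)),
      (l.foldl (pvCondSet dpw v) w).length = w.length := by
  intro l
  induction l with
  | nil => intro w; rfl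
  | cons j t ih => intro w; rw [List.foldl_cons, ih, pvCondSet_length]

def pvHit (dpw : List (Option Int)) (q : Nat) : Option Int :=
  match PySem.List.pyGet? dpw ((q : Int) - 1) with
  | some (some x) => some x
  | _ => none

lemma pvFoldSet_getElem? (dpw : List (Option Int)) (v : Int) :
    ∀ (len : Nat) (a : Int) (w : List (Option Int)) (q : Nat), 1 ≤ a → q < w.length →
      ((PySem.List.pyRange a (a + len) 1).foldl (pvCondSet dpw v) w)[q]? =
        if a ≤ (q : Int) ∧ (q : Int) < a + len then
          (match pvHit dpw q with
           | some x => some (some (x + v))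
           | none => w[q]?)
        else w[q]? := by
  intro len
  induction len with
  | zero =>
    intro a w q ha hq
    rw [show a + (0:Nat) = a by push_cast; ring, PySem.List.pyRange_one_eq_nil (le_refl a)]
    simp only [List.foldl_nil]
    rw [if_neg (by omega)]
  | succ len ih =>
    intro a w q ha hq
    rw [show a + ((len+1 : Nat) : Int) = (a+1) + (len : Int) by push_cast; ring]
    rw [PySem.List.pyRange_one_cons (by omega)]
    rw [List.foldl_cons]
    rw [ih (a+1) (pvCondSet dpw v w a) q (by omega) (by rw [pvCondSet_length]; exact hq)]
    -- characterise (pvCondSet dpw v w a)[q]?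
    have hset : (pvCondSet dpw v w a)[q]? =
        if a = (q : Int) then
          (match pvHit dpw q with
           | some x => some (some (x + v))
           | none => w[q]?)
        else w[q]? := by
      unfold pvCondSet pvHit
      by_cases heq : a = (q : Int)
      · subst heq
        rw [if_pos rfl]
        cases hm : PySem.List.pyGet? dpw ((q : Int) - 1) with
        | none => rfl
        | some o => cases o with
          | none => rfl
          | some x =>
            simp only []
            rw [show ((q : Int)).toNat = q by omega]
            rw [List.getElem?_set_self (by exact hq)]
      · rw [if_neg heq]
        cases hm : PySem.List.pyGet? dpw (a - 1) with
        | none => rfl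
        | some o => cases o with
          | none => rfl
          | some x =>
            simp only []
            rw [List.getElem?_set_ne (by omega)]
    rw [hset]
    by_cases h1 : a = (q : Int)
    · rw [if_pos h1,
        if_neg (show ¬(a + 1 ≤ (q : Int) ∧ (q : Int) < a + 1 + (len : Int)) by omega),
        if_pos (show a ≤ (q : Int) ∧ (q : Int) < a + 1 + (len : Int) by omega)]
    · rw [if_neg h1]
      by_cases h2 : a + 1 ≤ (q : Int) ∧ (q : Int) < a + 1 + (len : Int)
      · rw [if_pos h2, if_pos (show a ≤ (q : Int) ∧ (q : Int) < a + 1 + (len : Int) by omega)]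
      · rw [if_neg h2, if_neg (show ¬(a ≤ (q : Int) ∧ (q : Int) < a + 1 + (len : Int)) by omega)]

lemma pvStep (K : Nat) (hK : 1 ≤ K) (s : Int) (cs : List Int) (dpb : Int)
    (dpw : List (Option Int)) (v : Int) (h : pvInv K s cs dpb dpw) :
    pvInv K (s + v)
      (cs ++ [s + pvMax (PySem.List.slice cs (some (max ((cs.length : Int) - (K : Int) - 1) 0)) none) - (s + v)])
      (pvSkipFold dpb (PySem.List.slice dpw (some 1) none))
      ((PySem.List.pyRange 2 ((K : Int) + 1) 1).foldl (pvCondSet dpw v)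
        ((List.replicate (((K : Int) + 1)).toNat (none : Option Int)).set 1 (some (dpb + v)))) := by
  obtain ⟨hne, hdpb, hdpw⟩ := h
  set i := cs.length - 1 with hi
  have hclen : cs.length = i + 1 := by
    cases cs with
    | nil => exact absurd rfl hne
    | cons a t => simp [hi]
  set B := pvMax (PySem.List.slice cs (some (max ((cs.length : Int) - (K : Int) - 1) 0)) none) with hB
  set cs' := cs ++ [s + B - (s + v)] with hcs'
  have hlen' : cs'.length = i + 2 := by simp [hcs', hclen]
  have hgetD_last : cs'.getD (i + 1) 0 = s + B - (s + v) := by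
    rw [hcs', List.getD_eq_getElem?_getD]
    rw [List.getElem?_append_right (by omega)]
    simp [hclen]
  have hgetD_lt : ∀ n : Nat, n < cs.length → cs'.getD n 0 = cs.getD n 0 := by
    intro n hn
    rw [hcs', List.getD_eq_getElem?_getD, List.getElem?_append_left hn,
      ← List.getD_eq_getElem?_getD]
  have hwin := pvWindow K s cs dpb dpw ⟨hne, hdpb, hdpw⟩
  refine ⟨by rw [hcs']; simp, ?_, ?_⟩
  · rw [hwin, hlen']
    rw [show i + 2 - 1 = i + 1 by omega, hgetD_last]
    ring
  · -- the dp_work list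
    have htn : (((K : Int) + 1)).toNat = K + 1 := by omega
    rw [htn]
    set nw1 := (List.replicate (K + 1) (none : Option Int)).set 1 (some (dpb + v)) with hnw1
    have hnw1len : nw1.length = K + 1 := by simp [hnw1]
    have hnw1get : ∀ q : Nat, nw1[q]? =
        if q = 1 then (if q < K + 1 then some (some (dpb + v)) else none)
        else (if q < K + 1 then some none else none) := by
      intro q
      by_cases hq1 : q = 1
      · subst hq1
        rw [hnw1, if_pos rfl, List.getElem?_set_self (by simp; omega)]
        rw [if_pos (by omega)]
      · rw [hnw1, if_neg hq1, List.getElem?_set_ne (by omega), List.getElem?_replicate]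
    have hrange : ((K : Int) + 1) = 2 + ((K - 1 : Nat) : Int) := by omega
    rw [hrange]
    set F := fun q : Nat =>
      if 1 ≤ q ∧ q ≤ min (cs'.length - 1) K then some (cs'.getD (cs'.length - 1 - q) 0 + (s + v))
      else none with hF
    apply List.ext_getElem?
    intro q
    have hmapget : ((List.range (K + 1)).map F)[q]? =
        if q < K + 1 then some (F q) else none := by
      by_cases hqK : q < K + 1
      · rw [List.getElem?_map, List.getElem?_range hqK]; simp [hqK]
      · rw [List.getElem?_eq_none (by simp; omega), if_neg hqK]
    rw [hmapget]
    by_cases hqK : q < K + 1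
    · rw [pvFoldSet_getElem? dpw v (K - 1) 2 nw1 q (by omega) (by rw [hnw1len]; omega)]
      by_cases hq2 : 2 ≤ (q : Int) ∧ (q : Int) < 2 + ((K - 1 : Nat) : Int)
      · -- 2 ≤ q ≤ K
        rw [if_pos hq2]
        have hdpwget : dpw[q-1]? =
            some (if 1 ≤ q - 1 ∧ q - 1 ≤ min i K then some (cs.getD (i - (q - 1)) 0 + s) else none) := by
          rw [hdpw, List.getElem?_map, List.getElem?_range (by omega)]
          rfl
        have hhit : pvHit dpw q =
            if 1 ≤ q - 1 ∧ q - 1 ≤ min i K then some (cs.getD (i - (q - 1)) 0 + s) else none := by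
          unfold pvHit
          have hc : (q : Int) - 1 = ((q - 1 : Nat) : Int) := by omega
          rw [hc, PySem.List.pyGet?_natCast, hdpwget]
          by_cases hC : 1 ≤ q - 1 ∧ q - 1 ≤ min i K
          · rw [if_pos hC]
          · rw [if_neg hC]
        rw [hhit]
        by_cases hcond : 1 ≤ q - 1 ∧ q - 1 ≤ min i K
        · rw [if_pos hcond]
          rw [if_pos hqK, hF]
          simp only []
          rw [if_pos (by omega : 1 ≤ q ∧ q ≤ min (cs'.length - 1) K)]
          have hidx : cs'.length - 1 - q = i - (q - 1) := by omega
          rw [hidx, hgetD_lt _ (by omega)]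
          congr 2
          ring
        · rw [if_neg hcond]
          rw [hnw1get, if_neg (by omega), hF]
          simp only []
          rw [if_neg (by omega : ¬(1 ≤ q ∧ q ≤ min (cs'.length - 1) K))]
      · -- q = 0 or q = 1
        rw [if_neg hq2, hnw1get, if_pos hqK]
        by_cases hq1 : q = 1
        · subst hq1
          rw [if_pos rfl, if_pos (by omega), hF]
          simp only []
          rw [if_pos (by omega : 1 ≤ 1 ∧ 1 ≤ min (cs'.length - 1) K)]
          have hidx : cs'.length - 1 - 1 = i := by omega
          rw [hidx, hgetD_lt _ (by omega), hdpb]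
          congr 2
          ring
        · have hq0 : q = 0 := by omega
          subst hq0
          rw [if_neg (by omega), hF]
          simp only []
          rw [if_neg (by omega : ¬(1 ≤ 0 ∧ 0 ≤ min (cs'.length - 1) K))]
    · rw [if_neg hqK]
      rw [List.getElem?_eq_none]
      rw [pvFoldSet_length, hnw1len]
      omega

lemma pvAGet?_eq (a : Array (Option Int)) (i : Int) :
    pvAGet? a i = PySem.List.pyGet? a.toList i := by
  unfold pvAGet? PySem.List.pyGet?
  rw [Array.length_toList]
  cases PySem.List.pyIdx? a.size i with
  | none => rfl
  | some j => simp [Array.getElem?_toList]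

lemma pvArrFold_toList (dpw : Array (Option Int)) (v : Int) :
    ∀ (l : List Int) (w : Array (Option Int)),
      (l.foldl (fun w j =>
          match pvAGet? dpw (j - 1) with
          | some (some x) => w.set! j.toNat (some (x + v))
          | _ => w) w).toList =
        l.foldl (pvCondSet dpw.toList v) w.toList := by
  intro l
  induction l with
  | nil => intro w; rfl
  | cons j t ih =>
    intro w
    rw [List.foldl_cons, List.foldl_cons, ih]
    congr 1
    rw [pvAGet?_eq]
    unfold pvCondSet
    cases PySem.List.pyGet? dpw.toList (j - 1) with
    | none => rfl
    | some o =>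
      cases o with
      | none => rfl
      | some x => simp [Array.set!]

lemma pvFold (K : Nat) (hK : 1 ≤ K) :
    ∀ (es : List Int) (s : Int) (cs : List Int) (dpb : Int) (dpw : Array (Option Int)),
      pvInv K s cs dpb dpw.toList →
      pvInv K
        (es.foldl (fun (st : Int × List Int) v =>
          let s := st.1
          let c := st.2
          let b := s + pvMax (PySem.List.slice c (some (max ((c.length : Int) - (K : Int) - 1) 0)) none)
          let s' := s + v
          (s', c ++ [b - s'])) (s, cs)).1
        (es.foldl (fun (st : Int × List Int) v =>
          let s := st.1
          let c := st.2
          let b := s + pvMax (PySem.List.slice c (some (max ((c.length : Int) - (K : Int) - 1) 0)) none)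
          let s' := s + v
          (s', c ++ [b - s'])) (s, cs)).2
        (es.foldl (fun (st : Int × Array (Option Int)) v =>
          let dpb := st.1
          let dpw := st.2
          let newBreak := pvSkipFold dpb (PySem.List.slice dpw.toList (some 1) none)
          let nw1 := (Array.replicate (((K : Int) + 1)).toNat (none : Option Int)).set! 1 (some (dpb + v))
          let nw := (PySem.List.pyRange 2 ((K : Int) + 1) 1).foldl (fun w j =>
              match pvAGet? dpw (j - 1) with
              | some (some x) => w.set! j.toNat (some (x + v))
              | _ => w) nw1
          (newBreak, nw)) (dpb, dpw)).1
        ((es.foldl (fun (st : Int × Array (Option Int)) v =>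
          let dpb := st.1
          let dpw := st.2
          let newBreak := pvSkipFold dpb (PySem.List.slice dpw.toList (some 1) none)
          let nw1 := (Array.replicate (((K : Int) + 1)).toNat (none : Option Int)).set! 1 (some (dpb + v))
          let nw := (PySem.List.pyRange 2 ((K : Int) + 1) 1).foldl (fun w j =>
              match pvAGet? dpw (j - 1) with
              | some (some x) => w.set! j.toNat (some (x + v))
              | _ => w) nw1
          (newBreak, nw)) (dpb, dpw)).2).toList := by
  intro es
  induction es with
  | nil => intro s cs dpb dpw h; exact h
  | cons v t ih =>
    intro s cs dpb dpw h
    rw [List.foldl_cons, List.foldl_cons]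
    apply ih
    have harr : ((PySem.List.pyRange 2 ((K : Int) + 1) 1).foldl (fun w j =>
        match pvAGet? dpw (j - 1) with
        | some (some x) => w.set! j.toNat (some (x + v))
        | _ => w)
        ((Array.replicate (((K : Int) + 1)).toNat (none : Option Int)).set! 1 (some (dpb + v)))).toList =
        (PySem.List.pyRange 2 ((K : Int) + 1) 1).foldl (pvCondSet dpw.toList v)
          ((List.replicate (((K : Int) + 1)).toNat (none : Option Int)).set 1 (some (dpb + v))) := by
      rw [pvArrFold_toList]
      congr 1
      simp [Array.set!]
    show pvInv K (s + v) _ _ _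
    rw [harr]
    exact pvStep K hK s cs dpb dpw.toList v h

lemma pvInit (K : Nat) :
    pvInv K 0 [0] 0 (List.replicate (((K : Int) + 1)).toNat (none : Option Int)) := by
  refine ⟨by simp, by simp, ?_⟩
  rw [show (((K : Int) + 1)).toNat = K + 1 by omega]
  apply List.ext_getElem?
  intro q
  by_cases hq : q < K + 1
  · rw [List.getElem?_replicate, if_pos hq, List.getElem?_map, List.getElem?_range hq]
    simp
    omega
  · rw [List.getElem?_replicate, if_neg hq, List.getElem?_eq_none (by simp; omega)]


-- ===== VERDICT (by name: the statement is the Claim_ definition above) =====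
theorem maximize_earnings_spec : Claim_equal_maximize_earnings := by
  intro earnings k hdom hpre
  unfold Spec_maximize_earnings
  by_cases hne : earnings = []
  · subst hne
    simp [maximize_earnings, maximize_earnings_alt]
  · have hk : 1 ≤ k := by
      rcases hpre with h | h
      · exact absurd h hne
      · exact h
    lift k to Nat using (by omega : (0 : Int) ≤ k) with K hKk
    have hK : 1 ≤ K := by exact_mod_cast hk
    simp only [maximize_earnings, maximize_earnings_alt]
    rw [if_neg (by simpa [List.length_eq_zero_iff] using hne), if_neg hne]
    have hf := pvFold K hK earnings 0 [0] 0
      (Array.replicate (((K : Int) + 1)).toNat (none : Option Int))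
      (by rw [Array.toList_replicate]; exact pvInit K)
    rw [pvOptFold_skip]
    exact pvWindow K _ _ _ _ hf
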